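-- pv_equiv track=rewrite | github.com/rhcarvalho/rest-event-log | events/models.py | parse_title
-- ===== SOURCE A (Python) =====
-- def parse_title(event):
--     word_list = event.split()
--     category = ''
--     person = ''
--     for i in word_list:
--         if i.startswith('@'):
--             person = i.strip('@')
--         elif i.startswith('#'):
--             category = i.strip('#')
--     return category, person
-- ===== SOURCE B (Python) =====
-- def parse_title(event):
--     person = None
--     category = None
--     for w in reversed(event.split()):
--         if person is None and w.startswith('@'):
--             person = w.strip('@')
--         if category is None and w.startswith('#'):
--             category = w.strip('#')
--         if person is not None and category is not None:
--             break
--     return (category if category is not None else '',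
--             person if person is not None else '')
-- ===== Notes on version B (the rewrite author's own statement) =====
-- stated objective: alternative
-- what changed: B scans the word list in reverse with an early break, taking the first reverse '@'/'#' match with None-markers, instead of A's forward last-write-wins fold over two string accumulators.
import Mathlib
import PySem

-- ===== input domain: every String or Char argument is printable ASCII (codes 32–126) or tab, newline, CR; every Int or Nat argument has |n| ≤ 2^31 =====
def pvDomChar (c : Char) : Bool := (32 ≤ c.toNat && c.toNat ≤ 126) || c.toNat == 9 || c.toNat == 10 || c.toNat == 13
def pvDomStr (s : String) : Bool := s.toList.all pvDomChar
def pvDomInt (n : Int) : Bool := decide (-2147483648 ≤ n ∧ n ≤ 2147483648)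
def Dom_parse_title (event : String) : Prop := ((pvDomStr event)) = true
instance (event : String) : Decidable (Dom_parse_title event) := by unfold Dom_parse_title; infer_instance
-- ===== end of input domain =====

-- B scans the words in reverse with early exit, taking the FIRST reverse match instead of
-- A's last-write-wins forward fold; objective: alternative (same asymptotic cost).

-- ===== PORT A =====
def parse_title (event : String) : String × String :=
  let word_list := PySem.Str.split₀ event
  word_list.foldl (fun (st : String × String) i =>
    if PySem.Str.startswith i "@" then (st.1, PySem.Str.stripChars i "@")
    else if PySem.Str.startswith i "#" then (PySem.Str.stripChars i "#", st.2)
    else st) ("", "")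

-- ===== PORT B =====
def parseTitleRevLoop : List String → Option String → Option String → Option String × Option String
  | [], per, cat => (per, cat)
  | w :: ws, per, cat =>
    let per' := if per.isNone ∧ PySem.Str.startswith w "@" then some (PySem.Str.stripChars w "@") else per
    let cat' := if cat.isNone ∧ PySem.Str.startswith w "#" then some (PySem.Str.stripChars w "#") else cat
    if per'.isSome ∧ cat'.isSome then (per', cat') else parseTitleRevLoop ws per' cat'

def parse_title_alt (event : String) : String × String :=
  let r := parseTitleRevLoop (PySem.Str.split₀ event).reverse none none
  (r.2.getD "", r.1.getD "")

-- ===== PRECONDITION & SPEC =====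
def Spec_parse_title (event : String) (out : String × String) : Prop := out = parse_title_alt event
instance (event : String) (out : String × String) : Decidable (Spec_parse_title event out) := by unfold Spec_parse_title; infer_instance

-- ===== CLAIM (what is proved, stated in full; the proofs are below) =====
def Claim_equal_parse_title : Prop := ∀ (event : String), Dom_parse_title event → Spec_parse_title event (parse_title event)

-- ===== LEMMAS AND PROOFS =====

-- a word cannot start with both '@' and '#'
theorem not_both_starts (s : List Char) (h : PySem.Chars.startswith s ['@'] = true) :
    PySem.Chars.startswith s ['#'] = false := by
  by_contra hc
  simp only [Bool.not_eq_false] at hc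
  rw [PySem.Chars.startswith_iff] at h hc
  rcases h with ⟨t1, h1⟩
  rcases hc with ⟨t2, h2⟩
  rw [← h1] at h2
  simp at h2

-- B's loop computes the first reverse '@'/'#' matches (unless already fixed)
theorem revLoop_spec (ws : List String) (per cat : Option String) :
    parseTitleRevLoop ws per cat =
      (per.or ((ws.find? (fun w => PySem.Str.startswith w "@")).map (fun w => PySem.Str.stripChars w "@")),
       cat.or ((ws.find? (fun w => PySem.Str.startswith w "#")).map (fun w => PySem.Str.stripChars w "#"))) := by
  induction ws generalizing per cat with
  | nil => simp [parseTitleRevLoop]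
  | cons w ws ih =>
    simp only [parseTitleRevLoop]
    by_cases ha : PySem.Chars.startswith w.toList ['@'] = true
    · have hh := not_both_starts w.toList ha
      cases per <;> cases cat <;> simp [List.find?, ha, hh, ih]
    · by_cases hh : PySem.Chars.startswith w.toList ['#'] = true
      · cases per <;> cases cat <;> simp [List.find?, ha, hh, ih]
      · cases per <;> cases cat <;> simp [List.find?, ha, hh, ih]

-- A's fold computes the last forward matches = first reverse matches
theorem foldA_spec (l : List String) (c p : String) :
    l.foldl (fun (st : String × String) i =>
      if PySem.Str.startswith i "@" then (st.1, PySem.Str.stripChars i "@")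
      else if PySem.Str.startswith i "#" then (PySem.Str.stripChars i "#", st.2)
      else st) (c, p) =
      (((l.reverse.find? (fun w => PySem.Str.startswith w "#")).map (fun w => PySem.Str.stripChars w "#")).getD c,
       ((l.reverse.find? (fun w => PySem.Str.startswith w "@")).map (fun w => PySem.Str.stripChars w "@")).getD p) := by
  induction l generalizing c p with
  | nil => simp
  | cons w l ih =>
    simp only [List.foldl_cons, List.reverse_cons]
    rw [List.find?_append, List.find?_append]
    by_cases ha : PySem.Chars.startswith w.toList ['@'] = true
    · have hh := not_both_starts w.toList ha
      rw [if_pos (by simpa using ha), ih]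
      cases h1 : l.reverse.find? (fun w => PySem.Str.startswith w "#") <;>
        cases h2 : l.reverse.find? (fun w => PySem.Str.startswith w "@") <;>
        simp [List.find?, ha, hh]
    · rw [if_neg (by simpa using ha)]
      by_cases hh : PySem.Chars.startswith w.toList ['#'] = true
      · rw [if_pos (by simpa using hh), ih]
        cases h1 : l.reverse.find? (fun w => PySem.Str.startswith w "#") <;>
          cases h2 : l.reverse.find? (fun w => PySem.Str.startswith w "@") <;>
          simp [List.find?, ha, hh]
      · rw [if_neg (by simpa using hh), ih]
        cases h1 : l.reverse.find? (fun w => PySem.Str.startswith w "#") <;>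
          cases h2 : l.reverse.find? (fun w => PySem.Str.startswith w "@") <;>
          simp [List.find?, ha, hh]

-- ===== VERDICT (by name: the statement is the Claim_ definition above) =====
theorem parse_title_spec : Claim_equal_parse_title := by
  intro event _
  unfold Spec_parse_title parse_title parse_title_alt
  rw [foldA_spec, revLoop_spec]
  cases h1 : (PySem.Str.split₀ event).reverse.find? (fun w => PySem.Str.startswith w "#") <;>
    cases h2 : (PySem.Str.split₀ event).reverse.find? (fun w => PySem.Str.startswith w "@") <;>
    simp
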